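-- pv_equiv track=rewrite | github.com/MrBrantCode/unitest_baseline | mut_generate/mist_train_cf/cf_81229/solution.py | text_transform
-- ===== SOURCE A (Python) =====
-- def text_transform(text):
--     result = ""
--     for char in text:
--         if char.isalpha():
--             num = ord(char.lower()) - 96
--             result += "{:02d}".format(num)
--         elif char == " ":
--             result += "00"
--         else:
--             result += char
--     return result
-- ===== SOURCE B (Python) =====
-- def text_transform(text):
--     # staged whole-string passes: one replace per letter (both cases), then spaces;
--     # inserted digits are never later patterns, so the passes do not interfere
--     for i in range(26):
--         code = '%02d' % (i + 1)
--         text = text.replace(chr(97 + i), code).replace(chr(65 + i), code)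
--     return text.replace(' ', '00')
-- ===== Notes on version B (the rewrite author's own statement) =====
-- stated objective: alternative
-- what changed: Replaces A's single per-character loop with branching and string concatenation by 53 staged whole-string str.replace passes (one per letter case pair, then spaces), correct because inserted digits never match later patterns.
import Mathlib
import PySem

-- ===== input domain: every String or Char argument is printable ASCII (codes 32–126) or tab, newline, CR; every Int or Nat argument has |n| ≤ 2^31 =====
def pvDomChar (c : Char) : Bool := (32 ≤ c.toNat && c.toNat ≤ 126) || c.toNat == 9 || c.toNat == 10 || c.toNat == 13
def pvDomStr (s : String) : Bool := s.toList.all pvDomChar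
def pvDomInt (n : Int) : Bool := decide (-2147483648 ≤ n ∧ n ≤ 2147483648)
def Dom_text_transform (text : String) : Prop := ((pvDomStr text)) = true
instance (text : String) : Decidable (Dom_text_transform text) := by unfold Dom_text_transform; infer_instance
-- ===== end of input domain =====

-- B replaces A's single per-character loop (branch and concatenate) by 53 staged
-- whole-string replace passes (one per letter case pair, then spaces); same results.

-- ===== PORT A =====
-- "{:02d}".format(num) / '%02d' % num: exact for every value reached here (num ∈ 1..26)
def pvFmt02 (num : Int) : List Char :=
  let s := (PySem.Int.toStr num).toList
  if s.length < 2 then '0' :: s else s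

def text_transform (text : String) : String :=
  String.ofList (text.toList.foldl (fun result char =>
    result ++
      (if PySem.Chars.isalpha char then
        -- char.lower() of a one-character string, then ord of it: PySem.Chars.lowerChar is exact
        pvFmt02 (((PySem.Chars.lowerChar char).toNat : Int) - 96)
      else if char = ' ' then ['0', '0']
      else [char])) [])

-- ===== PORT B =====
def text_transform_alt (text : String) : String :=
  PySem.Str.replace
    ((PySem.List.pyRange 0 26 1).foldl (fun t i =>
      let code := String.ofList (pvFmt02 (i + 1))
      PySem.Str.replace
        (PySem.Str.replace t (String.ofList [Char.ofNat (97 + i).toNat]) code)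
        (String.ofList [Char.ofNat (65 + i).toNat]) code) text)
    " " "00"

-- ===== PRECONDITION & SPEC =====
def Spec_text_transform (text : String) (out : String) : Prop := out = text_transform_alt text
instance (text : String) (out : String) : Decidable (Spec_text_transform text out) := by unfold Spec_text_transform; infer_instance

-- ===== CLAIM (what is proved, stated in full; the proofs are below) =====
def Claim_equal_text_transform : Prop := ∀ (text : String), Dom_text_transform text → Spec_text_transform text (text_transform text)

-- ===== LEMMAS AND PROOFS =====

-- A's loop body as a per-character function
def pvEncA (c : Char) : List Char :=
  if PySem.Chars.isalpha c then pvFmt02 (((PySem.Chars.lowerChar c).toNat : Int) - 96)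
  else if c = ' ' then ['0', '0']
  else [c]

-- B's pipeline at the List Char level (mirrors text_transform_alt through toList_replace)
def pvStage (i : Int) (s : List Char) : List Char :=
  PySem.Chars.replace
    (PySem.Chars.replace s [Char.ofNat (97 + i).toNat] (pvFmt02 (i + 1)))
    [Char.ofNat (65 + i).toNat] (pvFmt02 (i + 1))

def pvPipe (s : List Char) : List Char :=
  PySem.Chars.replace ((PySem.List.pyRange 0 26 1).foldl (fun t i => pvStage i t) s) [' '] ['0', '0']

-- replacing a single-character pattern is a flatMap
theorem pvReplace_single_go (a : Char) (new : List Char) :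
    ∀ (l acc : List Char) (fuel : Nat), l.length ≤ fuel →
    PySem.Chars.replace.go [a] new fuel l acc =
      acc.reverse ++ l.flatMap (fun c => if c = a then new else [c]) := by
  intro l
  induction l with
  | nil =>
    intro acc fuel _
    cases fuel <;> simp [PySem.Chars.replace.go]
  | cons c t ih =>
    intro acc fuel hf
    cases fuel with
    | zero => simp at hf
    | succ fuel =>
      have hf' : t.length ≤ fuel := by simpa using hf
      by_cases hc : c = a
      · have hpre : List.isPrefixOf [a] (c :: t) = true := by
          simp [List.isPrefixOf, hc]
        simp only [PySem.Chars.replace.go, hpre, if_pos, List.length_cons,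
          List.length_nil, Nat.zero_add, List.drop_succ_cons, List.drop_zero]
        rw [ih (new.reverse ++ acc) fuel hf']
        simp [hc]
      · have hpre : List.isPrefixOf [a] (c :: t) = false := by
          simp [List.isPrefixOf]
          exact fun h => hc h.symm
        simp only [PySem.Chars.replace.go, hpre, Bool.false_eq_true, if_false]
        rw [ih (c :: acc) fuel hf']
        simp [hc]

theorem pvReplace_single (a : Char) (new s : List Char) :
    PySem.Chars.replace s [a] new = s.flatMap (fun c => if c = a then new else [c]) := by
  unfold PySem.Chars.replace
  simp only [List.isEmpty_cons, Bool.false_eq_true, if_false]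
  simpa using pvReplace_single_go a new s [] s.length le_rfl

-- replacing a single-character pattern in a one-character string
theorem pvReplace_singleton (a c : Char) (new : List Char) :
    PySem.Chars.replace [c] [a] new = if c = a then new else [c] := by
  rw [pvReplace_single]
  split_ifs <;> simp_all

-- each stage is a flatMap, hence distributes over flatMap
theorem pvStage_flatMap (i : Int) (s : List Char) :
    pvStage i s = s.flatMap (fun c => pvStage i [c]) := by
  unfold pvStage
  rw [pvReplace_single, pvReplace_single, List.flatMap_assoc]
  congr 1
  funext c
  rw [pvReplace_singleton, pvReplace_single]

theorem pvFold_flatMap (L : List Int) : ∀ (s : List Char),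
    L.foldl (fun t i => pvStage i t) s =
      s.flatMap (fun c => L.foldl (fun t i => pvStage i t) [c]) := by
  induction L with
  | nil => intro s; simp
  | cons i L ih =>
    intro s
    simp only [List.foldl_cons]
    rw [pvStage_flatMap i s, ih (s.flatMap (fun c => pvStage i [c])), List.flatMap_assoc]
    congr 1
    funext c
    rw [ih (pvStage i [c])]

set_option maxHeartbeats 2000000 in
theorem pvPipe_flatMap (s : List Char) : pvPipe s = s.flatMap (fun c => pvPipe [c]) := by
  unfold pvPipe
  rw [pvFold_flatMap (PySem.List.pyRange 0 26 1) s]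
  rw [pvReplace_single]
  rw [List.flatMap_assoc]
  exact List.flatMap_congr (fun c _ => by rw [pvReplace_single])

set_option maxRecDepth 100000 in
set_option maxHeartbeats 4000000 in
theorem pvPipe_char : ∀ n ∈ List.range 128, pvPipe [Char.ofNat n] = pvEncA (Char.ofNat n) := by
  decide

theorem pvPipe_char' (c : Char) (h : pvDomChar c = true) : pvPipe [c] = pvEncA c := by
  have hn : c.toNat < 128 := by
    simp only [pvDomChar, Bool.or_eq_true, Bool.and_eq_true, decide_eq_true_eq, beq_iff_eq] at h
    omega
  have := pvPipe_char c.toNat (List.mem_range.mpr hn)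
  rwa [Char.ofNat_toNat] at this

-- the String-level port B computes pvPipe on the underlying character list
theorem pvFold_toList (L : List Int) : ∀ (t : String),
    (L.foldl (fun t i =>
      let code := String.ofList (pvFmt02 (i + 1))
      PySem.Str.replace
        (PySem.Str.replace t (String.ofList [Char.ofNat (97 + i).toNat]) code)
        (String.ofList [Char.ofNat (65 + i).toNat]) code) t).toList =
      L.foldl (fun s i => pvStage i s) t.toList := by
  induction L with
  | nil => intro t; rfl
  | cons i L ih =>
    intro t
    simp only [List.foldl_cons]
    rw [ih]
    have h : (PySem.Str.replace
        (PySem.Str.replace t (String.ofList [Char.ofNat (97 + i).toNat]) (String.ofList (pvFmt02 (i + 1))))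
        (String.ofList [Char.ofNat (65 + i).toNat]) (String.ofList (pvFmt02 (i + 1)))).toList =
        pvStage i t.toList := by
      simp [PySem.Str.toList_replace, pvStage, String.toList_ofList]
    rw [h]

theorem pvAlt_toList (text : String) : (text_transform_alt text).toList = pvPipe text.toList := by
  unfold text_transform_alt pvPipe
  rw [PySem.Str.toList_replace, pvFold_toList]
  rfl

-- ===== VERDICT (by name: the statement is the Claim_ definition above) =====
theorem text_transform_spec : Claim_equal_text_transform := by
  intro text hdom
  unfold Spec_text_transform text_transform
  have hmem : ∀ c ∈ text.toList, pvDomChar c = true := by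
    simpa [Dom_text_transform, pvDomStr, List.all_eq_true] using hdom
  have hA : (text.toList.foldl (fun result char =>
      result ++
        (if PySem.Chars.isalpha char then
          pvFmt02 (((PySem.Chars.lowerChar char).toNat : Int) - 96)
        else if char = ' ' then ['0', '0']
        else [char])) []) = text.toList.flatMap pvEncA := by
    rw [show (fun (result : List Char) (char : Char) =>
        result ++
          (if PySem.Chars.isalpha char then
            pvFmt02 (((PySem.Chars.lowerChar char).toNat : Int) - 96)
          else if char = ' ' then ['0', '0']
          else [char])) = fun result char => result ++ pvEncA char from rfl]
    rw [PySem.List.foldl_append_eq_flatMap, List.nil_append]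
  rw [hA]
  apply Eq.symm
  apply String.toList_inj.mp
  rw [pvAlt_toList, pvPipe_flatMap]
  calc text.toList.flatMap (fun c => pvPipe [c])
      = text.toList.flatMap pvEncA :=
        List.flatMap_congr (fun c hc => pvPipe_char' c (hmem c hc))
    _ = (String.ofList (text.toList.flatMap pvEncA)).toList := (String.toList_ofList).symm
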